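-- pv_equiv track=rewrite | github.com/loonwerks/INSPECTA-models | AGREE-SysMLv2/GUMBO_SysMLv2/gumboTransformers_2.py | or_expr
-- ===== SOURCE A (Python) =====
-- def or_expr(items):
--     if len(items) == 1:
--         return items[0]
--     # items should be [operand, operator, operand, operator, ...]
--     result = str(items[0])
--     i = 1
--     while i < len(items):
--         if i + 1 < len(items):
--             # Skip the operator token, get the operand
--             result = f"({result} or {items[i + 1]})"
--             i += 2
--         else:
--             break
--     return result
-- ===== SOURCE B (Python) =====
-- def or_expr(items):
--     if len(items) == 1:
--         return items[0]
--     ops = [x for i, x in enumerate(items) if i % 2 == 0]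
--     return '(' * (len(ops) - 1) + str(ops[0]) + ''.join(f' or {op})' for op in ops[1:])
-- ===== Notes on version B (the rewrite author's own statement) =====
-- stated objective: faster
-- what changed: Replaces A's index-stepping while loop that re-wraps the accumulator string each iteration with a one-pass closed form: extract the even-position operands, then emit all n-1 opening parens up front and append each later operand with ' or ' and its closing paren.
import Mathlib
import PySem

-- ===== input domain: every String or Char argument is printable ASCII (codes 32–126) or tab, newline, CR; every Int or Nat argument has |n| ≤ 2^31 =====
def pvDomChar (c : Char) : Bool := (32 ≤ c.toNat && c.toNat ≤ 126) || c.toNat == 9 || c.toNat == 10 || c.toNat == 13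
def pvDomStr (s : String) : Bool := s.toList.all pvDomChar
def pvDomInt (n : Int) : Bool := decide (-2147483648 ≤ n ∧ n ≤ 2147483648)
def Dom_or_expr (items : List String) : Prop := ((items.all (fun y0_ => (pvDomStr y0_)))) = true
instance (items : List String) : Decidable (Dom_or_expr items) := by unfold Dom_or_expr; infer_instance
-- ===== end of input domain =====

-- B folds the operands items[0::2] into the same left-nested 'or' string in one pass,
-- emitting all opening parens first instead of re-copying the accumulator each step (objective: faster; measured).

-- ===== PORT A =====
-- the while loop: state is (result, i); strings handled as List Char (Lean's String.append is kernel-opaque)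
def orLoopA (items : List String) (result : List Char) (i : Nat) : List Char :=
  if i < items.length then
    if _h : i + 1 < items.length then
      -- f"({result} or {items[i+1]})" ; index i+1 is in range here, so items[i+1] = items.getD (i+1) ""
      orLoopA items ('(' :: result ++ (" or ".toList ++ (items.getD (i+1) "").toList ++ [')'])) (i + 2)
    else result
  else result
termination_by items.length - i

def or_expr (items : List String) : String :=
  if items.length == 1 then items.getD 0 ""   -- items[0] (Pre_ excludes the empty list, where Python raises)
  else String.ofList (orLoopA items (items.getD 0 "").toList 1)

-- ===== PORT B =====
def or_expr_alt (items : List String) : String :=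
  if items.length == 1 then items.getD 0 ""   -- items[0] (Pre_ excludes the empty list, where Python raises)
  else
    -- ops = [x for i, x in enumerate(items) if i % 2 == 0]
    let ops := ((PySem.List.enumerate items 0).filter (fun p => PySem.Int.mod p.1 2 == 0)).map Prod.snd
    -- '(' * (len(ops)-1) + str(ops[0]) + ''.join(f' or {op})' for op in ops[1:])
    String.ofList (List.replicate (ops.length - 1) '(' ++ (ops.getD 0 "").toList
      ++ (ops.drop 1).flatMap (fun op => " or ".toList ++ op.toList ++ [')']))

-- ===== PRECONDITION & SPEC =====
-- Pre_ excludes only the empty list, on which Python A (and B) raise IndexError at items[0]/ops[0].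
def Pre_or_expr (items : List String) : Prop := items ≠ []
instance (items : List String) : Decidable (Pre_or_expr items) := by unfold Pre_or_expr; infer_instance
def pvWitness_or_expr : List String := ["a", "or", "b"]

def Spec_or_expr (items : List String) (out : String) : Prop := out = or_expr_alt items
instance (items : List String) (out : String) : Decidable (Spec_or_expr items out) := by unfold Spec_or_expr; infer_instance

-- ===== CLAIM (what is proved, stated in full; the proofs are below) =====
def Claim_equal_or_expr : Prop := ∀ (items : List String), Dom_or_expr items → Pre_or_expr items → Spec_or_expr items (or_expr items)

-- ===== LEMMAS AND PROOFS =====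

-- the operands at even positions: evens l = l[0::2]; odds l = l[1::2]
def evens : List String → List String
  | [] => []
  | [x] => [x]
  | x :: _ :: t => x :: evens t

def odds : List String → List String
  | [] => []
  | _ :: t => evens t

theorem evens_cons (x : String) (t : List String) : evens (x :: t) = x :: odds t := by
  cases t <;> simp [evens, odds]

-- B's ops list is evens items
theorem filter_enumerate_parity (l : List String) :
    ∀ n : Int, ((PySem.List.enumerate l n).filter (fun p => p.1 % 2 == 0)).map Prod.snd
      = if n % 2 == 0 then evens l else odds l := by
  induction l with
  | nil => intro n; simp only [PySem.List.enumerate_nil, List.filter_nil, List.map_nil]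
           split_ifs <;> simp [evens, odds]
  | cons x t ih =>
    intro n
    rw [PySem.List.enumerate_cons]
    by_cases hd : n % 2 = 0
    · have h' : ¬ (n + 1) % 2 = 0 := by omega
      simp [hd, h', ih (n+1), evens_cons]
    · have h' : (n + 1) % 2 = 0 := by omega
      simp [hd, h', ih (n+1), odds]

-- the port's predicate, with PySem's floored mod unfolded at the positive divisor 2
theorem pred_mod_two :
    (fun p : Int × String => PySem.Int.mod p.1 2 == 0) = (fun p => p.1 % 2 == 0) := by
  funext p
  rw [PySem.Int.mod_eq_emod_of_pos (by norm_num)]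

-- shifting the index loop one element down the list
theorem orLoopA_shift (x : String) : ∀ (l : List String) (r : List Char) (i : Nat),
    orLoopA (x :: l) r (i + 1) = orLoopA l r i := by
  intro l
  have H : ∀ k r i, l.length - i ≤ k → orLoopA (x :: l) r (i + 1) = orLoopA l r i := by
    intro k
    induction k with
    | zero =>
      intro r i h
      conv_lhs => rw [orLoopA]
      conv_rhs => rw [orLoopA]
      simp only [List.length_cons]
      simp [show ¬ i < l.length by omega, show ¬ i + 1 < l.length + 1 by omega]
    | succ k ih =>
      intro r i h
      conv_lhs => rw [orLoopA]
      conv_rhs => rw [orLoopA]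
      simp only [List.length_cons]
      by_cases h1 : i < l.length
      · rw [if_pos (by omega : i + 1 < l.length + 1), if_pos h1]
        by_cases h2 : i + 1 < l.length
        · rw [dif_pos (by omega : i + 1 + 1 < l.length + 1), dif_pos h2]
          have hg : (x :: l).getD (i + 1 + 1) "" = l.getD (i + 1) "" := by
            simp [List.getD]
          rw [hg, show i + 1 + 2 = (i + 2) + 1 by ring, ih _ (i + 2) (by omega)]
        · rw [dif_neg (by omega : ¬ i + 1 + 1 < l.length + 1), dif_neg h2]
      · rw [if_neg (by omega : ¬ i + 1 < l.length + 1), if_neg h1]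
  exact fun r i => H (l.length - i) r i le_rfl

-- the fold A's loop performs over the odd-position operands
def wrapFold (r : List Char) : List String → List Char
  | [] => r
  | op :: t => wrapFold ('(' :: r ++ (" or ".toList ++ op.toList ++ [')'])) t

theorem orLoopA_eq_wrapFold : ∀ (l : List String) (r : List Char),
    orLoopA l r 0 = wrapFold r (odds l) := by
  intro l
  induction l using evens.induct with
  | case1 => intro r; rw [orLoopA]; simp [odds, wrapFold]
  | case2 a => intro r; conv_lhs => rw [orLoopA]
               simp [odds, evens, wrapFold]
  | case3 a b t ih =>
    intro r
    conv_lhs => rw [orLoopA]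
    simp only [List.length_cons]
    rw [if_pos (by omega), dif_pos (by omega),
        show (0:Nat) + 2 = 1 + 1 by rfl, orLoopA_shift, orLoopA_shift, ih]
    simp [odds, evens_cons, wrapFold, List.getD]

-- closed form of the fold: all '('s first, then r, then each operand with its ' or ' and ')'
theorem wrapFold_closed : ∀ (ops : List String) (r : List Char),
    wrapFold r ops = List.replicate ops.length '(' ++ r
      ++ ops.flatMap (fun op => " or ".toList ++ op.toList ++ [')']) := by
  intro ops
  induction ops with
  | nil => intro r; simp [wrapFold]
  | cons op t ih =>
    intro r
    rw [wrapFold, ih]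
    simp [List.replicate_succ']

-- ===== VERDICT (by name: the statement is the Claim_ definition above) =====
theorem or_expr_spec : Claim_equal_or_expr := by
  intro items _ hpre
  unfold Spec_or_expr or_expr or_expr_alt
  by_cases h1 : items.length == 1
  · simp [h1]
  · simp only [h1]
    obtain ⟨x, l, rfl⟩ : ∃ x l, items = x :: l := by
      cases items with
      | nil => exact absurd rfl hpre
      | cons a b => exact ⟨a, b, rfl⟩
    have hops : ((PySem.List.enumerate (x :: l) 0).filter (fun p => PySem.Int.mod p.1 2 == 0)).map Prod.snd
        = x :: odds l := by
      rw [pred_mod_two, filter_enumerate_parity]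
      simp [evens_cons]
    simp only [hops]
    rw [show (1:Nat) = 0 + 1 by rfl, orLoopA_shift, orLoopA_eq_wrapFold, wrapFold_closed]
    simp [List.getD]
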